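-- pv_equiv track=rewrite | github.com/relastle/vim-nayvy | python3/pydra/models/import.py | get_import_block_indices
-- ===== SOURCE A (Python) =====
-- from typing import List, Tuple
--
-- def get_import_block_indices(lines: List[str]) -> List[Tuple[int, int]]:
--     '''
--     Returns:
--         [
--             (1st block's start begin(inclusive), 1st block's end(exclusive)),
--             (2nd block's start begin(inclusive), 2nd block's end(exclusive)),
--             (3rd block's start begin(inclusive), 3rd block's end(exclusive)),
--             ]
--     '''
--     res = []
--     in_block = False
--     try:
--         for i, line in enumerate(lines):
--             if (
--                 not in_block and
--                 (
--                     line.startswith('import ') or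
--                     line.startswith('from ')
--                 )
--             ):
--                 in_block = True
--                 start_index = i
--                 continue
--             elif in_block and line == '':
--                 in_block = False
--                 res.append((start_index, i))
--     except Exception:
--         return res
--     return res
-- ===== SOURCE B (Python) =====
-- def get_import_block_indices(lines):
--     res = []
--     i = 0
--     n = len(lines)
--     while i < n:
--         if lines[i].startswith('import ') or lines[i].startswith('from '):
--             j = i + 1
--             while j < n and lines[j] != '':
--                 j += 1
--             if j == n:
--                 break
--             res.append((i, j))
--             i = j + 1
--         else:
--             i += 1
--     return res
-- ===== Notes on version B (the rewrite author's own statement) =====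
-- stated objective: alternative
-- what changed: Replaced the single enumerate pass driven by an in_block boolean flag with an index-based outer scan that finds each block start and an inner loop that consumes the block up to the next blank line (breaking without appending if none), removing the flag state entirely.
import Mathlib
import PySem

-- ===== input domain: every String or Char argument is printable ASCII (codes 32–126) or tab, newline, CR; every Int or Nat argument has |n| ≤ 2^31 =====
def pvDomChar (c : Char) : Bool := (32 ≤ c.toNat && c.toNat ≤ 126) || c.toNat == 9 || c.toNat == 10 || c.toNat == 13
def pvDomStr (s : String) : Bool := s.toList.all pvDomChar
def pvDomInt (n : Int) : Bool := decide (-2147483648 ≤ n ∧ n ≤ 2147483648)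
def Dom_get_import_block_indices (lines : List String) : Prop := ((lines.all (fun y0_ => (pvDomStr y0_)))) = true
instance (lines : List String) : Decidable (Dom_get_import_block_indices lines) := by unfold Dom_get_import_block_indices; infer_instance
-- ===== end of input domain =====

-- B replaces A's single enumerate pass driven by an in_block boolean flag with an
-- index-based outer scan plus an inner loop consuming each block up to the next blank
-- line; alternative decomposition, same O(n) cost.

-- ===== PORT A =====
-- the loop body of A: state = (res, in_block, start_index)
def pvAStep (st : List (Int × Int) × Bool × Int) (p : Int × String) : List (Int × Int) × Bool × Int :=
  if ¬ st.2.1 ∧ (PySem.Str.startswith p.2 "import " ∨ PySem.Str.startswith p.2 "from ") then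
    (st.1, true, p.1)
  else if st.2.1 ∧ p.2 = "" then
    (st.1 ++ [(st.2.2, p.1)], false, st.2.2)
  else st

def get_import_block_indices (lines : List String) : List (Int × Int) :=
  ((PySem.List.enumerate lines 0).foldl pvAStep ([], false, 0)).1

-- ===== PORT B =====
-- inner while loop of B: advance j while j < n and lines[j] != ''
def pvBInner (lines : List String) (j : Nat) : Nat :=
  if h : j < lines.length then
    if lines[j] ≠ "" then pvBInner lines (j + 1) else j
  else j
termination_by lines.length - j

theorem pvBInner_ge (lines : List String) (j : Nat) : j ≤ pvBInner lines j := by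
  unfold pvBInner
  split
  · split
    · have := pvBInner_ge lines (j + 1); omega
    · exact le_refl j
  · exact le_refl j
termination_by lines.length - j

-- outer while loop of B
def pvBOuter (lines : List String) (i : Nat) (res : List (Int × Int)) : List (Int × Int) :=
  if h : i < lines.length then
    if PySem.Str.startswith lines[i] "import " ∨ PySem.Str.startswith lines[i] "from " then
      let j := pvBInner lines (i + 1)
      if j = lines.length then res
      else pvBOuter lines (j + 1) (res ++ [((i : Int), (j : Int))])
    else pvBOuter lines (i + 1) res
  else res
termination_by lines.length - i
decreasing_by
  · have := pvBInner_ge lines (i + 1); omega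
  · omega

def get_import_block_indices_alt (lines : List String) : List (Int × Int) :=
  pvBOuter lines 0 []

-- ===== PRECONDITION & SPEC =====
def Spec_get_import_block_indices (lines : List String) (out : List (Int × Int)) : Prop := out = get_import_block_indices_alt lines
instance (lines : List String) (out : List (Int × Int)) : Decidable (Spec_get_import_block_indices lines out) := by unfold Spec_get_import_block_indices; infer_instance

-- ===== CLAIM (what is proved, stated in full; the proofs are below) =====
def Claim_equal_get_import_block_indices : Prop := ∀ (lines : List String), Dom_get_import_block_indices lines → Spec_get_import_block_indices lines (get_import_block_indices lines)

-- ===== LEMMAS AND PROOFS =====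

-- suffix-list reformulations of B's two loops, used to relate the two loop shapes
mutual
def pvOut' : List String → Nat → List (Int × Int) → List (Int × Int)
  | [], _, res => res
  | x :: xs, k, res =>
    if PySem.Str.startswith x "import " ∨ PySem.Str.startswith x "from " then
      pvIn' xs (k + 1) res k
    else
      pvOut' xs (k + 1) res

def pvIn' : List String → Nat → List (Int × Int) → Nat → List (Int × Int)
  | [], _, res, _ => res
  | x :: xs, k, res, s =>
    if x = "" then pvOut' xs (k + 1) (res ++ [((s : Int), (k : Int))])
    else pvIn' xs (k + 1) res s
end

-- A's fold, started in either flag state, computes pvOut' / pvIn'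
theorem pvA_joint (l : List String) :
    (∀ (k : Nat) (res : List (Int × Int)) (st : Int),
      ((PySem.List.enumerate l (k : Int)).foldl pvAStep (res, false, st)).1 = pvOut' l k res) ∧
    (∀ (k : Nat) (res : List (Int × Int)) (s : Nat),
      ((PySem.List.enumerate l (k : Int)).foldl pvAStep (res, true, (s : Int))).1 = pvIn' l k res s) := by
  induction l with
  | nil => simp [PySem.List.enumerate_nil, pvOut', pvIn']
  | cons x xs ih =>
    constructor
    · intro k res st
      rw [PySem.List.enumerate_cons, List.foldl_cons]
      by_cases hc : PySem.Str.startswith x "import " = true ∨ PySem.Str.startswith x "from " = true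
      · simp at hc
        have := ih.2 (k + 1) res k
        push_cast at this
        simpa [pvAStep, pvOut', hc] using this
      · simp at hc
        have := ih.1 (k + 1) res st
        push_cast at this
        simpa [pvAStep, pvOut', hc] using this
    · intro k res s
      rw [PySem.List.enumerate_cons, List.foldl_cons]
      by_cases hb : x = ""
      · have := ih.1 (k + 1) (res ++ [((s : Int), (k : Int))]) ((s : Int))
        push_cast at this
        simpa [pvAStep, pvIn', hb] using this
      · have := ih.2 (k + 1) res s
        push_cast at this
        simpa [pvAStep, pvIn', hb] using this

-- B's index loops compute pvOut' / pvIn' on the corresponding suffix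
theorem pvB_joint (lines : List String) :
    ∀ (m k : Nat), lines.length - k ≤ m → k ≤ lines.length →
    (∀ res, pvOut' (lines.drop k) k res = pvBOuter lines k res) ∧
    (∀ res s, pvIn' (lines.drop k) k res s =
      (if pvBInner lines k = lines.length then res
       else pvBOuter lines (pvBInner lines k + 1)
              (res ++ [((s : Int), (pvBInner lines k : Int))]))) := by
  intro m
  induction m with
  | zero =>
    intro k hm hk
    have hkn : k = lines.length := by omega
    subst hkn
    constructor
    · intro res
      rw [List.drop_length, pvBOuter]
      simp [pvOut']
    · intro res s
      rw [List.drop_length, pvBInner]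
      simp [pvIn']
  | succ m ih =>
    intro k hm hk
    by_cases hlt : k < lines.length
    · have hdrop : lines.drop k = lines[k] :: lines.drop (k + 1) :=
        List.drop_eq_getElem_cons hlt
      have ih' := ih (k + 1) (by omega) (by omega)
      constructor
      · intro res
        rw [hdrop, pvBOuter]
        simp only [dif_pos hlt]
        by_cases hc : PySem.Str.startswith lines[k] "import " ∨ PySem.Str.startswith lines[k] "from "
        · simp only [pvOut', hc, if_pos]
          exact ih'.2 res k
        · simp only [pvOut', hc, if_neg]
          exact ih'.1 res
      · intro res s
        rw [hdrop, pvBInner]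
        simp only [dif_pos hlt]
        by_cases hb : lines[k] = ""
        · simp only [pvIn', hb, ne_eq, not_true_eq_false, if_false]
          have hkne : ¬ (k = lines.length) := by omega
          simp only [if_neg hkne]
          exact ih'.1 (res ++ [((s : Int), (k : Int))])
        · simp only [pvIn', ne_eq, hb, not_false_eq_true, if_pos]
          exact ih'.2 res s
    · have hkn : k = lines.length := by omega
      subst hkn
      constructor
      · intro res
        rw [List.drop_length, pvBOuter]
        simp [pvOut']
      · intro res s
        rw [List.drop_length, pvBInner]
        simp [pvIn']

-- ===== VERDICT (by name: the statement is the Claim_ definition above) =====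
theorem get_import_block_indices_spec : Claim_equal_get_import_block_indices := by
  intro lines _
  unfold Spec_get_import_block_indices get_import_block_indices get_import_block_indices_alt
  have h1 := (pvA_joint lines).1 0 [] 0
  have h2 := ((pvB_joint lines) lines.length 0 (by omega) (by omega)).1 []
  simp only [List.drop_zero] at h2
  simpa [h2] using h1
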